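-- pv_equiv track=rewrite | github.com/Epecb/vk-playlist-download | main.py | ids_10_url_row
-- ===== SOURCE A (Python) =====
-- def ids_10_url_row(data):
--     song_col = len(data["list"])
--     cnt = 0
--     delim1 = ","
--     delim2 = ""
--     result = ""
--     while (cnt < song_col):
--         if cnt % 10 == 0:
--             result += delim2 + str(data["list"][cnt][1]) + \
--                 "_" + str(data["list"][cnt][0])
--             delim2 = "\n"
--         else:
--             result += delim1 + str(data["list"][cnt][1]) + \
--                 "_" + str(data["list"][cnt][0])
--         cnt += 1
--     return result
-- ===== SOURCE B (Python) =====
-- def ids_10_url_row(data):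
--     toks = [str(p[1]) + "_" + str(p[0]) for p in data["list"]]
--     rows = [",".join(toks[i:i + 10]) for i in range(0, len(toks), 10)]
--     return "\n".join(rows)
-- ===== Notes on version B (the rewrite author's own statement) =====
-- stated objective: idiomatic
-- what changed: Replaces the while-loop with a modulo counter and delimiter-sentinel state by a token list that is sliced into chunks of 10 and joined with ','/'\n'.
import Mathlib
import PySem

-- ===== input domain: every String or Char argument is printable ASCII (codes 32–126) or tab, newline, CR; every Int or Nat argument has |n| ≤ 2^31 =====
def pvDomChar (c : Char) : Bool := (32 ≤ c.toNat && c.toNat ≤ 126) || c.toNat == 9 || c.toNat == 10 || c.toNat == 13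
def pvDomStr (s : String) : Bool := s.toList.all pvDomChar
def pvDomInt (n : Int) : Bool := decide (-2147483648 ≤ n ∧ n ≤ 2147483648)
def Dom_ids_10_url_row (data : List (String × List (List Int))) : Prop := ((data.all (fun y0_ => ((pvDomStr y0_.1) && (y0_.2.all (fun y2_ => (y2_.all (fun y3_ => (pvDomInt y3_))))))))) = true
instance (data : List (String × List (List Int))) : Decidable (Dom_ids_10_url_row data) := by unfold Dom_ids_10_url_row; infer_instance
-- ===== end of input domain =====

-- B replaces A's while-loop with modulo counter and delimiter-sentinel state by
-- slicing a token list into chunks of 10 and joining them (idiomatic restructuring).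


-- ===== PORT A =====
-- the while loop, as a recursion on cnt (cnt starts at 0 and only increments, so Nat);
-- row/element indexing is pyGetD (Pre_ keeps every index in range, where pyGetD is exact)
def ids_10_url_row_loop (l : List (List Int)) (songCol cnt : Nat)
    (delim1 delim2 result : String) : String :=
  if cnt < songCol then
    if cnt % 10 = 0 then
      ids_10_url_row_loop l songCol (cnt + 1) delim1 "\n"
        (result ++ delim2
          ++ PySem.Int.toStr (PySem.List.pyGetD (PySem.List.pyGetD l (cnt : Int) []) 1 0)
          ++ "_" ++ PySem.Int.toStr (PySem.List.pyGetD (PySem.List.pyGetD l (cnt : Int) []) 0 0))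
    else
      ids_10_url_row_loop l songCol (cnt + 1) delim1 delim2
        (result ++ delim1
          ++ PySem.Int.toStr (PySem.List.pyGetD (PySem.List.pyGetD l (cnt : Int) []) 1 0)
          ++ "_" ++ PySem.Int.toStr (PySem.List.pyGetD (PySem.List.pyGetD l (cnt : Int) []) 0 0))
  else result
termination_by songCol - cnt

-- data["list"] is first-match lookup (Pre_ guarantees the key is present, where getD [] is exact)
def ids_10_url_row (data : List (String × List (List Int))) : String :=
  let l := (data.lookup "list").getD []
  ids_10_url_row_loop l l.length 0 "," "" ""

-- ===== PORT B =====
def ids_10_url_row_alt (data : List (String × List (List Int))) : String :=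
  let toks := ((data.lookup "list").getD []).map (fun p =>
    PySem.Int.toStr (PySem.List.pyGetD p 1 0) ++ "_" ++ PySem.Int.toStr (PySem.List.pyGetD p 0 0))
  let rows := (PySem.List.pyRange 0 (toks.length : Int) 10).map (fun i =>
    PySem.Str.join "," (PySem.List.slice toks (some i) (some (i + 10))))
  PySem.Str.join "\n" rows

-- ===== PRECONDITION & SPEC =====
-- Pre_ = exactly where the Python A returns: the key "list" is present (else KeyError)
-- and every row has at least two entries (else row[1] raises IndexError)
def Pre_ids_10_url_row (data : List (String × List (List Int))) : Prop :=
  (data.lookup "list").isSome = true ∧ ∀ row ∈ (data.lookup "list").getD [], 2 ≤ row.length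
instance (data : List (String × List (List Int))) : Decidable (Pre_ids_10_url_row data) := by
  unfold Pre_ids_10_url_row; infer_instance
def pvWitness_ids_10_url_row : (List (String × List (List Int))) := [("list", [[1, 2], [3, 4]])]

def Spec_ids_10_url_row (data : List (String × List (List Int))) (out : String) : Prop :=
  out = ids_10_url_row_alt data
instance (data : List (String × List (List Int))) (out : String) :
    Decidable (Spec_ids_10_url_row data out) := by unfold Spec_ids_10_url_row; infer_instance

-- ===== CLAIM (what is proved, stated in full; the proofs are below) =====
def Claim_equal_ids_10_url_row : Prop := ∀ (data : List (String × List (List Int))),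
  Dom_ids_10_url_row data → Pre_ids_10_url_row data →
  Spec_ids_10_url_row data (ids_10_url_row data)

-- ===== LEMMAS AND PROOFS =====

-- the token of one row
def pvTok (row : List Int) : String :=
  PySem.Int.toStr (PySem.List.pyGetD row 1 0) ++ "_" ++ PySem.Int.toStr (PySem.List.pyGetD row 0 0)

-- what A's loop appends after position k with pending delimiter d2
def pvTail : Nat → String → List String → String
  | _, _, [] => ""
  | k, d2, t :: ts => (if k % 10 = 0 then d2 else ",") ++ t ++ pvTail (k + 1) "\n" ts

-- B's rows, recursively in chunks of 10
def pvChunks : List String → List String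
  | [] => []
  | t :: ts => PySem.Str.join "," (t :: ts.take 9) :: pvChunks (ts.drop 9)
termination_by ts => ts.length
decreasing_by simp

-- joinD d2 rows = d2 ++ r1 ++ "\n" ++ r2 ++ …
def pvJoinD : String → List String → String
  | _, [] => ""
  | d2, r :: rs => d2 ++ r ++ pvJoinD "\n" rs

def pvCommaCat : List String → String
  | [] => ""
  | x :: xs => "," ++ x ++ pvCommaCat xs

theorem pvTail_mod : ∀ (ts : List String) (k : Nat) (d2 : String),
    pvTail (k % 10) d2 ts = pvTail k d2 ts := by
  intro ts
  induction ts with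
  | nil => intro k d2; rfl
  | cons t ts ih =>
    intro k d2
    simp only [pvTail]
    rw [show k % 10 % 10 = k % 10 by omega, ← ih (k % 10 + 1) "\n", ← ih (k + 1) "\n",
      show (k % 10 + 1) % 10 = (k + 1) % 10 by omega]

theorem loop_eq_tail : ∀ (m : Nat) (l : List (List Int)) (k : Nat) (d2 r : String),
    k + m = l.length → (k % 10 = 0 ∨ d2 = "\n") →
    ids_10_url_row_loop l l.length k "," d2 r = r ++ pvTail k d2 ((l.map pvTok).drop k) := by
  intro m
  induction m with
  | zero =>
    intro l k d2 r hk _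
    rw [ids_10_url_row_loop]
    simp [show ¬ k < l.length by omega, List.drop_of_length_le (by simp; omega : (l.map pvTok).length ≤ k), pvTail]
  | succ m ih =>
    intro l k d2 r hk hd
    have hlt : k < l.length := by omega
    have hget : PySem.List.pyGetD l (k : Int) [] = l[k] := by
      rw [PySem.List.pyGetD_eq_getElem l [] (by positivity) (by exact_mod_cast hlt)]
      simp
    have hdrop : (l.map pvTok).drop k = pvTok l[k] :: (l.map pvTok).drop (k + 1) := by
      rw [List.drop_eq_getElem_cons (by simpa using hlt)]
      simp
    rw [ids_10_url_row_loop, if_pos hlt, hdrop]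
    by_cases h10 : k % 10 = 0
    · rw [if_pos h10]
      rw [ih l (k + 1) "\n" _ (by omega) (Or.inr rfl)]
      simp only [pvTail, if_pos h10, hget, pvTok, String.append_assoc]
    · rw [if_neg h10]
      rcases hd with hd | hd
      · exact absurd hd h10
      · subst hd
        rw [ih l (k + 1) "\n" _ (by omega) (Or.inr rfl)]
        simp only [pvTail, if_neg h10, hget, pvTok, String.append_assoc]

theorem join_comma : ∀ (xs : List String) (x : String),
    PySem.Str.join "," (x :: xs) = x ++ pvCommaCat xs := by
  intro xs
  induction xs with
  | nil =>
    intro x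
    apply String.toList_inj.mp
    simp [PySem.Str.toList_join, PySem.Chars.join_singleton, pvCommaCat]
  | cons y ys ih =>
    intro x
    apply String.toList_inj.mp
    have h1 : (PySem.Str.join "," (x :: y :: ys)).toList
        = x.toList ++ (",").toList ++ (PySem.Str.join "," (y :: ys)).toList := by
      simp [PySem.Str.toList_join, PySem.Chars.join_cons_cons]
    rw [h1, ih y]
    simp [pvCommaCat, String.toList_append]

theorem join_nl_cons : ∀ (rs : List String) (r : String),
    PySem.Str.join "\n" (r :: rs) = r ++ pvJoinD "\n" rs := by
  intro rs
  induction rs with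
  | nil =>
    intro r
    apply String.toList_inj.mp
    simp [PySem.Str.toList_join, PySem.Chars.join_singleton, pvJoinD]
  | cons q qs ih =>
    intro r
    apply String.toList_inj.mp
    have h1 : (PySem.Str.join "\n" (r :: q :: qs)).toList
        = r.toList ++ ("\n").toList ++ (PySem.Str.join "\n" (q :: qs)).toList := by
      simp [PySem.Str.toList_join, PySem.Chars.join_cons_cons]
    rw [h1, ih q]
    simp [pvJoinD, String.toList_append]

theorem join_nl : ∀ (rows : List String), PySem.Str.join "\n" rows = pvJoinD "" rows := by
  intro rows
  cases rows with
  | nil => rfl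
  | cons r rs =>
    rw [join_nl_cons rs r]
    show _ = "" ++ r ++ pvJoinD "\n" rs
    simp

theorem tail_inner : ∀ (ts : List String) (m : Nat), 1 ≤ m → m ≤ 9 →
    pvTail m "\n" ts = pvCommaCat (ts.take (10 - m)) ++ pvTail 0 "\n" (ts.drop (10 - m)) := by
  intro ts
  induction ts with
  | nil => intro m _ _; simp [pvTail, pvCommaCat]
  | cons t ts ih =>
    intro m h1 h9
    have hm : ¬ m % 10 = 0 := by omega
    by_cases h : m = 9
    · subst h
      simp only [pvTail, if_neg hm, show 10 - 9 = 1 by norm_num, List.drop_succ_cons]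
      rw [← pvTail_mod ts 10 "\n"]
      simp [pvCommaCat]
    · have hlt : m ≤ 8 := by omega
      simp only [pvTail, if_neg hm]
      rw [ih (m + 1) (by omega) (by omega)]
      have h10 : 10 - m = (9 - m) + 1 := by omega
      have h9m : 10 - (m + 1) = 9 - m := by omega
      rw [h10, h9m, List.take_succ_cons, List.drop_succ_cons]
      simp [pvCommaCat, String.append_assoc]

theorem tail_eq_joinD : ∀ (n : Nat) (ts : List String) (d2 : String), ts.length ≤ n →
    pvTail 0 d2 ts = pvJoinD d2 (pvChunks ts) := by
  intro n
  induction n with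
  | zero =>
    intro ts d2 h
    have : ts = [] := List.eq_nil_of_length_eq_zero (by omega)
    subst this; simp [pvTail, pvChunks, pvJoinD]
  | succ n ih =>
    intro ts d2 h
    cases ts with
    | nil => simp [pvTail, pvChunks, pvJoinD]
    | cons t ts =>
      simp only [pvTail, pvChunks, pvJoinD]
      rw [tail_inner ts 1 le_rfl (by norm_num)]
      rw [ih (ts.drop 9) "\n" (by simp at h ⊢; omega)]
      rw [join_comma (ts.take 9) t]
      simp [String.append_assoc, show 10 - 1 = 9 by norm_num]

theorem pyRange_ten_cons (a b : Int) (h : a < b) :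
    PySem.List.pyRange a b 10 = a :: PySem.List.pyRange (a + 10) b 10 := by
  rw [PySem.List.pyRange_of_pos a b (by norm_num), PySem.List.pyRange_of_pos (a + 10) b (by norm_num)]
  rw [if_pos h]
  by_cases h2 : a + 10 < b
  · rw [if_pos h2]
    have hc : ((b - a + 10 - 1) / 10).toNat = ((b - (a + 10) + 10 - 1) / 10).toNat + 1 := by omega
    rw [hc, List.range_succ_eq_map]
    simp only [List.map_cons, List.map_map]
    refine congrArg₂ _ (by simp) ?_
    apply List.map_congr_left
    intro k _
    simp [Function.comp]
    ring
  · rw [if_neg h2]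
    have hc : ((b - a + 10 - 1) / 10).toNat = 1 := by omega
    rw [hc]
    simp [List.range_succ]
  

theorem rows_eq_chunks : ∀ (m : Nat) (full : List String) (a : Nat), full.length - a ≤ m →
    (PySem.List.pyRange (a : Int) (full.length : Int) 10).map (fun i =>
      PySem.Str.join "," (PySem.List.slice full (some i) (some (i + 10)))) =
    pvChunks (full.drop a) := by
  intro m
  induction m with
  | zero =>
    intro full a h
    have ha : full.length ≤ a := by omega
    rw [List.drop_of_length_le ha]
    rw [PySem.List.pyRange_of_pos _ _ (by norm_num : (0:Int) < 10)]
    rw [if_neg (by exact_mod_cast not_lt.mpr (by exact_mod_cast ha))]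
    simp [pvChunks]
  | succ m ih =>
    intro full a h
    by_cases ha : full.length ≤ a
    · rw [List.drop_of_length_le ha]
      rw [PySem.List.pyRange_of_pos _ _ (by norm_num : (0:Int) < 10)]
      rw [if_neg (by exact_mod_cast not_lt.mpr (by exact_mod_cast ha))]
      simp [pvChunks]
    · have hlt : a < full.length := by omega
      rw [pyRange_ten_cons _ _ (by exact_mod_cast hlt)]
      rw [List.map_cons]
      rw [List.drop_eq_getElem_cons hlt, pvChunks]
      have hslice : PySem.List.slice full (some (a : Int)) (some ((a : Int) + 10))
          = full[a] :: (full.drop (a + 1)).take 9 := by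
        rw [show ((a : Int) + 10) = ((a + 10 : Nat) : Int) by push_cast; ring,
          PySem.List.slice_natCast full a (a + 10),
          List.drop_eq_getElem_cons hlt,
          show a + 10 - a = 10 by omega, List.take_succ_cons]
      rw [hslice]
      have hrest : (PySem.List.pyRange ((a : Int) + 10) (full.length : Int) 10).map (fun i =>
          PySem.Str.join "," (PySem.List.slice full (some i) (some (i + 10))))
          = pvChunks (full.drop (a + 10)) := by
        rw [show ((a : Int) + 10) = ((a + 10 : Nat) : Int) by push_cast; ring]
        exact ih full (a + 10) (by omega)
      rw [hrest, List.drop_drop]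

-- ===== VERDICT (by name: the statement is the Claim_ definition above) =====
theorem ids_10_url_row_spec : Claim_equal_ids_10_url_row := by
  intro data _ _
  show ids_10_url_row_loop ((data.lookup "list").getD []) ((data.lookup "list").getD
        []).length 0 "," "" ""
      = PySem.Str.join "\n" ((PySem.List.pyRange 0
          (((((data.lookup "list").getD []).map pvTok).length : Nat) : Int) 10).map
          (fun i => PySem.Str.join "," (PySem.List.slice
            (((data.lookup "list").getD []).map pvTok) (some i) (some (i + 10)))))
  have hA := loop_eq_tail ((data.lookup "list").getD []).length ((data.lookup "list").getD []) 0 "" "" (by omega) (Or.inl rfl)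
  simp only [List.drop_zero] at hA
  have hB := rows_eq_chunks (((data.lookup "list").getD []).map pvTok).length
      (((data.lookup "list").getD []).map pvTok) 0 (by omega)
  simp only [Nat.cast_zero, List.drop_zero] at hB
  rw [hA, hB, join_nl, tail_eq_joinD (((data.lookup "list").getD []).map pvTok).length _ _ le_rfl]
  simp
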